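-- pv_equiv track=rewrite | github.com/tomdu3/free-codecamp-challenges | daily_challenge_fcc/2025/2025-12/25-12-21/daily_hours.py | daylight_hours
-- ===== SOURCE A (Python) =====
-- conversion_table = {
--     -90: 24,
--     -75: 23,
--     -60: 21,
--     -45: 15,
--     -30: 13,
--     -15: 12,
--     0: 12,
--     15: 11,
--     30: 10,
--     45: 9,
--     60: 6,
--     75: 2,
--     90: 0
--     }
--
-- def daylight_hours(latitude):
--     if latitude in conversion_table:
--         return conversion_table[latitude]
--
--     latitudes = list(conversion_table.keys())
--     latitudes.sort()
--
--     for i in range(len(latitudes) - 1):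
--         if latitudes[i] < latitude < latitudes[i + 1]:
--             closest_latitude = min(conversion_table.keys(), key=lambda lat: abs(lat - latitude))
--             return conversion_table[closest_latitude]
-- ===== SOURCE B (Python) =====
-- # B: closed-form nearest-multiple-of-15 arithmetic + table indexed by slot,
-- # replacing A's membership test, sort, adjacent-pair scan and min() over keys.
-- # Integer latitudes never tie (midpoints are at x.5), and the nearest multiple
-- # of 15 with ties-toward-lower is (latitude + 7) // 15 * 15, so the slot index
-- # ((latitude + 7) // 15) + 6 == (latitude + 97) // 15 picks the same key A's
-- # min() picks.
--
-- _DAYLIGHT = [24, 23, 21, 15, 13, 12, 12, 11, 10, 9, 6, 2, 0]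
--
-- def daylight_hours(latitude):
--     if -90 <= latitude <= 90:
--         return _DAYLIGHT[(latitude + 97) // 15]
-- ===== Notes on version B (the rewrite author's own statement) =====
-- stated objective: simpler
-- what changed: Replaces the membership test, key sort, adjacent-pair scan and min-by-distance over the keys with a closed-form slot computation ((latitude+97)//15) into a fixed value list, after a single bounds check.
import Mathlib
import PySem

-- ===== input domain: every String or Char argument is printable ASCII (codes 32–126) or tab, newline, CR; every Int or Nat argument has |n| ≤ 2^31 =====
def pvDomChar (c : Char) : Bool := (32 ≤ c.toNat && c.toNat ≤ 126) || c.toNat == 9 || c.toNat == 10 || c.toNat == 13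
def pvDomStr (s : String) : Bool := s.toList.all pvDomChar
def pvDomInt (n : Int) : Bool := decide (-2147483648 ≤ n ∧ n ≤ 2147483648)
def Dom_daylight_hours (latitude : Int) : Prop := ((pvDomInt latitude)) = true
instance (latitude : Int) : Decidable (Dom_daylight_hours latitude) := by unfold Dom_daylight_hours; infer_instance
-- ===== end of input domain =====

-- B replaces A's sort + adjacent-pair scan + min-by-distance with a closed-form
-- slot computation into a fixed list (objective: simpler).

-- ===== PORT A =====
def conversion_table : PySem.Dict Int Int :=
  PySem.Dict.ofList [(-90,24),(-75,23),(-60,21),(-45,15),(-30,13),(-15,12),(0,12),(15,11),(30,10),(45,9),(60,6),(75,2),(90,0)]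

def daylight_hours (latitude : Int) : Option Int :=
  if conversion_table.contains latitude then conversion_table.get? latitude
  else
    let latitudes := PySem.List.sorted conversion_table.keys (fun x => x) false
    (PySem.List.pyRange 0 ((latitudes.length : Int) - 1) 1).foldl
      (fun acc i =>
        match acc with
        | some r => some r
        | none =>
          if PySem.List.pyGetD latitudes i 0 < latitude ∧ latitude < PySem.List.pyGetD latitudes (i + 1) 0 then
            match PySem.List.min? conversion_table.keys (fun lat => |lat - latitude|) with
            | some closest_latitude => conversion_table.get? closest_latitude
            | none => none
          else acc) none

-- ===== PORT B =====
def daylight_table : List Int := [24, 23, 21, 15, 13, 12, 12, 11, 10, 9, 6, 2, 0]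

def daylight_hours_alt (latitude : Int) : Option Int :=
  if -90 ≤ latitude ∧ latitude ≤ 90 then
    PySem.List.pyGet? daylight_table (PySem.Int.floordiv (latitude + 97) 15)
  else none

-- ===== PRECONDITION & SPEC =====
def Spec_daylight_hours (latitude : Int) (out : Option Int) : Prop := out = daylight_hours_alt latitude
instance (latitude : Int) (out : Option Int) : Decidable (Spec_daylight_hours latitude out) := by unfold Spec_daylight_hours; infer_instance

-- ===== CLAIM (what is proved, stated in full; the proofs are below) =====
def Claim_equal_daylight_hours : Prop := ∀ (latitude : Int), Dom_daylight_hours latitude → Spec_daylight_hours latitude (daylight_hours latitude)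

-- ===== LEMMAS AND PROOFS =====

-- In range: 181 concrete cases, checked by evaluation.
set_option maxRecDepth 4096 in
theorem inRange_eq : ∀ n ∈ List.range 181,
    daylight_hours ((n : Int) - 90) = daylight_hours_alt ((n : Int) - 90) := by
  decide

theorem foldl_none_of_fixed {α β : Type} (f : Option β → α → Option β) (l : List α)
    (hf : ∀ acc x, f acc x = acc) : l.foldl f none = none := by
  induction l with
  | nil => rfl
  | cons y t ih => simp [List.foldl, hf, ih]

theorem a_out_of_range (latitude : Int) (h : latitude < -90 ∨ 90 < latitude) :
    daylight_hours latitude = none := by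
  have hct : conversion_table = PySem.Dict.mk [(-90,24),(-75,23),(-60,21),(-45,15),(-30,13),(-15,12),(0,12),(15,11),(30,10),(45,9),(60,6),(75,2),(90,0)] := by decide
  unfold daylight_hours
  rw [hct]
  have hs : PySem.List.sorted (PySem.Dict.mk [((-90:Int),(24:Int)),(-75,23),(-60,21),(-45,15),(-30,13),(-15,12),(0,12),(15,11),(30,10),(45,9),(60,6),(75,2),(90,0)]).keys (fun x => x) false = [-90,-75,-60,-45,-30,-15,0,15,30,45,60,75,90] := by decide
  simp only [hs]
  rw [if_neg (by simp [PySem.Dict.contains_mk]; omega)]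
  apply foldl_none_of_fixed
  intro acc i
  cases acc with
  | some r => rfl
  | none =>
    show (if _ then _ else _) = _
    rw [if_neg]
    rintro ⟨h1, h2⟩
    have hb : ∀ (j : Int), -90 ≤ PySem.List.pyGetD ([(-90:Int),-75,-60,-45,-30,-15,0,15,30,45,60,75,90]) j 0 ∧
        PySem.List.pyGetD ([(-90:Int),-75,-60,-45,-30,-15,0,15,30,45,60,75,90]) j 0 ≤ 90 := by
      intro j
      unfold PySem.List.pyGetD
      cases hg : PySem.List.pyGet? ([(-90:Int),-75,-60,-45,-30,-15,0,15,30,45,60,75,90]) j with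
      | none => simp
      | some v =>
        have hv := PySem.List.mem_of_pyGet?_eq_some _ hg
        simp only [Option.getD_some]
        fin_cases hv <;> omega
    have hb1 := hb i
    have hb2 := hb (i + 1)
    omega

theorem b_out_of_range (latitude : Int) (h : latitude < -90 ∨ 90 < latitude) :
    daylight_hours_alt latitude = none := by
  unfold daylight_hours_alt
  rw [if_neg]; omega

-- ===== VERDICT (by name: the statement is the Claim_ definition above) =====
theorem daylight_hours_spec : Claim_equal_daylight_hours := by
  intro latitude _
  unfold Spec_daylight_hours
  by_cases h : -90 ≤ latitude ∧ latitude ≤ 90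
  · have hn : (latitude + 90).toNat ∈ List.range 181 := by
      simp [List.mem_range]; omega
    have := inRange_eq _ hn
    have heq : ((latitude + 90).toNat : Int) - 90 = latitude := by omega
    rwa [heq] at this
  · rw [a_out_of_range latitude (by omega), b_out_of_range latitude (by omega)]
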